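-- pv_equiv track=rewrite | github.com/ChristianAven/adventofcode-2024-python | day5/1.py | page_is_valid
-- ===== SOURCE A (Python) =====
-- def page_is_valid(page, rule_map):
--     pos = {v: i for i, v in enumerate(page)}
--     for a, successors in rule_map.items():
--         if a not in pos:
--             continue
--         pa = pos[a]
--         for b in successors:
--             pb = pos.get(b)
--             if pb is not None and pa > pb:
--                 return False
--     return True
-- ===== SOURCE B (Python) =====
-- def page_is_valid(page, rule_map):
--     pos = {v: i for i, v in enumerate(page)}
--     keys = list(pos)
--     for u in keys:
--         pu = pos[u]
--         for v in keys:
--             if pu > pos[v] and v in rule_map.get(u, ()):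
--                 return False
--     return True
-- ===== Notes on version B (the rewrite author's own statement) =====
-- stated objective: alternative
-- what changed: A scans the rule map's edges and looks up positions; B scans all ordered pairs of distinct placed values by position and consults the rule map per pair, so the rule structure is only queried, never iterated.
import Mathlib
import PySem

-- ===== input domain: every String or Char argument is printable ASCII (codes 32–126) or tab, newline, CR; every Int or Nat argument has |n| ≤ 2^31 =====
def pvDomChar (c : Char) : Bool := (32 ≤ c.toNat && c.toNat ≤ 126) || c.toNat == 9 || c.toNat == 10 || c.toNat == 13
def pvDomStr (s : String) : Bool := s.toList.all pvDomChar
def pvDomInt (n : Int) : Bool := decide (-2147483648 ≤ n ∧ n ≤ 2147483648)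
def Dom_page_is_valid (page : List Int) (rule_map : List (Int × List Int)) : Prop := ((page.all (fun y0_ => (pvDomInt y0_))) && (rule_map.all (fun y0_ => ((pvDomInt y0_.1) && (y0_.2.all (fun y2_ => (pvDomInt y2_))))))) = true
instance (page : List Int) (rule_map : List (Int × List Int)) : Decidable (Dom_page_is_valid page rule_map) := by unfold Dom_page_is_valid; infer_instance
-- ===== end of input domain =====

-- B replaces A's scan over the rule edges by a scan over all ordered pairs of placed
-- values, consulting the rule map per pair instead of iterating it (objective: alternative;
-- B does quadratically many pair checks over the distinct page values, so it is not faster).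

-- ===== PORT A =====

-- pos = {v: i for i, v in enumerate(page)}   (shared line of both Pythons; last occurrence wins)
def pvPos (page : List Int) : PySem.Dict Int Int :=
  (PySem.List.enumerate page).foldl (fun d p => d.insert p.2 p.1) PySem.Dict.empty

-- inner 'for b in successors: …' of A ('false' = the Python's 'return False')
def pvSuccLoop (pos : PySem.Dict Int Int) (pa : Int) : List Int → Bool
  | [] => true
  | b :: rest =>
    match pos.get? b with
    | some pb => if pa > pb then false else pvSuccLoop pos pa rest
    | none => pvSuccLoop pos pa rest

-- outer 'for a, successors in rule_map.items(): …' of A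
def pvRulesLoop (pos : PySem.Dict Int Int) : List (Int × List Int) → Bool
  | [] => true
  | (a, succs) :: rest =>
    match pos.get? a with
    | none => pvRulesLoop pos rest
    | some pa => if pvSuccLoop pos pa succs then pvRulesLoop pos rest else false

def page_is_valid (page : List Int) (rule_map : List (Int × List Int)) : Bool :=
  let pos := pvPos page
  pvRulesLoop pos rule_map

-- ===== PORT B =====

-- inner 'for v in keys: …' of B
def pvPairInner (pos : PySem.Dict Int Int) (rm : PySem.Dict Int (List Int)) (u pu : Int) : List Int → Bool
  | [] => true
  | v :: rest =>
    if pu > pos.getD v 0 && (rm.getD u []).contains v then false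
    else pvPairInner pos rm u pu rest

-- outer 'for u in keys: …' of B
def pvPairOuter (pos : PySem.Dict Int Int) (rm : PySem.Dict Int (List Int)) (keys : List Int) : List Int → Bool
  | [] => true
  | u :: rest =>
    if pvPairInner pos rm u (pos.getD u 0) keys then pvPairOuter pos rm keys rest else false

def page_is_valid_alt (page : List Int) (rule_map : List (Int × List Int)) : Bool :=
  let pos := pvPos page
  let keys := pos.keys
  pvPairOuter pos ⟨rule_map⟩ keys keys

-- ===== PRECONDITION & SPEC =====
-- Pre_ excludes association lists whose keys repeat: rule_map stands for a Python dict, which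
-- cannot hold duplicate keys, so such lists correspond to no input of the Python programs.
def Pre_page_is_valid (page : List Int) (rule_map : List (Int × List Int)) : Prop :=
  (rule_map.map Prod.fst).Nodup
instance (page : List Int) (rule_map : List (Int × List Int)) : Decidable (Pre_page_is_valid page rule_map) := by unfold Pre_page_is_valid; infer_instance

def pvWitness_page_is_valid : List Int × (List (Int × List Int)) :=
  ([1, 3, 2], [(1, [2, 3]), (2, [4])])

def Spec_page_is_valid (page : List Int) (rule_map : List (Int × List Int)) (out : Bool) : Prop := out = page_is_valid_alt page rule_map
instance (page : List Int) (rule_map : List (Int × List Int)) (out : Bool) : Decidable (Spec_page_is_valid page rule_map out) := by unfold Spec_page_is_valid; infer_instance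

-- ===== CLAIM (what is proved, stated in full; the proofs are below) =====
def Claim_equal_page_is_valid : Prop := ∀ (page : List Int) (rule_map : List (Int × List Int)), Dom_page_is_valid page rule_map → Pre_page_is_valid page rule_map → Spec_page_is_valid page rule_map (page_is_valid page rule_map)

-- ===== LEMMAS AND PROOFS =====

theorem pvSuccLoop_iff (pos : PySem.Dict Int Int) (pa : Int) (l : List Int) :
    pvSuccLoop pos pa l = true ↔ ∀ b ∈ l, ∀ pb, pos.get? b = some pb → pa ≤ pb := by
  induction l with
  | nil => simp [pvSuccLoop]
  | cons b rest ih =>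
    simp only [pvSuccLoop, List.mem_cons]
    cases h : pos.get? b with
    | none =>
      rw [ih]
      constructor
      · rintro hr x (rfl | hx) pb hpb
        · simp [h] at hpb
        · exact hr x hx pb hpb
      · intro hr x hx pb hpb; exact hr x (Or.inr hx) pb hpb
    | some pb =>
      by_cases hgt : pa > pb
      · simp only [if_pos hgt]
        constructor
        · intro hf; exact absurd hf (by simp)
        · intro hr; exact absurd (hr b (Or.inl rfl) pb h) (by omega)
      · simp only [if_neg hgt]
        rw [ih]
        constructor
        · rintro hr x (rfl | hx) pb' hpb'
          · rw [h] at hpb'; injection hpb' with e; omega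
          · exact hr x hx pb' hpb'
        · intro hr x hx pb' hpb'; exact hr x (Or.inr hx) pb' hpb'

theorem pvRulesLoop_iff (pos : PySem.Dict Int Int) (l : List (Int × List Int)) :
    pvRulesLoop pos l = true ↔
      ∀ p ∈ l, ∀ pa, pos.get? p.1 = some pa → pvSuccLoop pos pa p.2 = true := by
  induction l with
  | nil => simp [pvRulesLoop]
  | cons q rest ih =>
    obtain ⟨a, succs⟩ := q
    simp only [pvRulesLoop, List.mem_cons]
    cases h : pos.get? a with
    | none =>
      rw [ih]
      constructor
      · rintro hr p (rfl | hp) pa hpa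
        · rw [h] at hpa; exact absurd hpa (by simp)
        · exact hr p hp pa hpa
      · intro hr p hp pa hpa; exact hr p (Or.inr hp) pa hpa
    | some pa =>
      show (if pvSuccLoop pos pa succs = true then pvRulesLoop pos rest else false) = true ↔ _
      by_cases hs : pvSuccLoop pos pa succs = true
      · simp only [if_pos hs]
        rw [ih]
        constructor
        · rintro hr p (rfl | hp) pa' hpa'
          · rw [h] at hpa'; injection hpa' with e; subst e; exact hs
          · exact hr p hp pa' hpa'
        · intro hr p hp pa' hpa'; exact hr p (Or.inr hp) pa' hpa'
      · rw [if_neg hs]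
        constructor
        · intro hf; exact absurd hf (by simp)
        · intro hr; exact absurd (hr (a, succs) (Or.inl rfl) pa h) hs

theorem pvPairInner_iff (pos : PySem.Dict Int Int) (rm : PySem.Dict Int (List Int))
    (u pu : Int) (l : List Int) :
    pvPairInner pos rm u pu l = true ↔
      ∀ v ∈ l, ¬(pu > pos.getD v 0 ∧ v ∈ rm.getD u []) := by
  induction l with
  | nil => simp [pvPairInner]
  | cons v rest ih =>
    simp only [pvPairInner]
    by_cases hc : pu > pos.getD v 0 && (rm.getD u []).contains v
    · simp only [if_pos hc]
      simp only [Bool.and_eq_true, decide_eq_true_eq, List.contains_eq_mem] at hc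
      constructor
      · intro hf; exact absurd hf (by simp)
      · intro hr; exact absurd ⟨hc.1, hc.2⟩ (hr v List.mem_cons_self)
    · simp only [if_neg hc, ih]
      simp only [Bool.and_eq_true, decide_eq_true_eq, List.contains_eq_mem, not_and] at hc
      constructor
      · intro hr x hx
        rcases List.mem_cons.mp hx with rfl | hx'
        · rintro ⟨h1, h2⟩; exact hc h1 h2
        · exact hr x hx'
      · intro hr x hx; exact hr x (List.mem_cons_of_mem _ hx)

theorem pvPairOuter_iff (pos : PySem.Dict Int Int) (rm : PySem.Dict Int (List Int))
    (keys l : List Int) :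
    pvPairOuter pos rm keys l = true ↔
      ∀ u ∈ l, pvPairInner pos rm u (pos.getD u 0) keys = true := by
  induction l with
  | nil => simp [pvPairOuter]
  | cons u rest ih =>
    simp only [pvPairOuter]
    by_cases hi : pvPairInner pos rm u (pos.getD u 0) keys = true
    · simp only [if_pos hi, ih]
      constructor
      · intro hr x hx
        rcases List.mem_cons.mp hx with rfl | hx'
        · exact hi
        · exact hr x hx'
      · intro hr x hx; exact hr x (List.mem_cons_of_mem _ hx)
    · rw [if_neg hi]
      constructor
      · intro hf; exact absurd hf (by simp)
      · intro hr; exact absurd (hr u List.mem_cons_self) hi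

theorem pvPos_mem_keys (page : List Int) (u : Int) :
    u ∈ (pvPos page).keys ↔ ∃ pu, (pvPos page).get? u = some pu := by
  rw [← PySem.Dict.contains_iff_mem_keys, PySem.Dict.contains_eq_isSome_get?]
  cases (pvPos page).get? u <;> simp

theorem pvMk_nodup_keys (rule_map : List (Int × List Int))
    (hnd : (rule_map.map Prod.fst).Nodup) :
    (PySem.Dict.mk rule_map : PySem.Dict Int (List Int)).keys.Nodup := by
  simpa [PySem.Dict.keys] using hnd

-- ===== VERDICT (by name: the statement is the Claim_ definition above) =====
theorem page_is_valid_spec : Claim_equal_page_is_valid := by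
  intro page rule_map _ hnd
  unfold Spec_page_is_valid page_is_valid page_is_valid_alt
  set pos := pvPos page with hpos
  set rm : PySem.Dict Int (List Int) := ⟨rule_map⟩ with hrm
  have hitems : rm.items = rule_map := rfl
  have hrmnd : rm.keys.Nodup := pvMk_nodup_keys rule_map hnd
  have hA := pvRulesLoop_iff pos rule_map
  have hB := pvPairOuter_iff pos rm pos.keys pos.keys
  have hmain : pvRulesLoop pos rule_map = true ↔
      pvPairOuter pos rm pos.keys pos.keys = true := by
    rw [hA, hB]
    constructor
    · -- A-side property ⇒ B-side property
      intro ha u hu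
      rw [pvPairInner_iff]
      rintro v hv ⟨hgt, hvm⟩
      -- v ∈ rm.getD u [] forces rm.get? u = some succs with v ∈ succs
      cases hg : rm.get? u with
      | none =>
        rw [PySem.Dict.getD_eq_get?_getD, hg] at hvm
        simp at hvm
      | some succs =>
        have hvs : v ∈ succs := by
          rwa [PySem.Dict.getD_eq_get?_getD, hg] at hvm
        have hmem : (u, succs) ∈ rule_map := by
          have := PySem.Dict.mem_items_of_get?_eq_some rm hg
          rwa [hitems] at this
        obtain ⟨pu, hpu⟩ := (pvPos_mem_keys page u).mp hu
        rw [← hpos] at hpu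
        obtain ⟨pv, hpv⟩ := (pvPos_mem_keys page v).mp hv
        rw [← hpos] at hpv
        have hle := pvSuccLoop_iff pos pu succs |>.mp (ha (u, succs) hmem pu hpu) v hvs pv hpv
        rw [PySem.Dict.getD_of_get?_eq_some pos 0 hpu, PySem.Dict.getD_of_get?_eq_some pos 0 hpv] at hgt
        omega
    · -- B-side property ⇒ A-side property
      intro hb p hp pa hpa
      obtain ⟨a, succs⟩ := p
      rw [pvSuccLoop_iff]
      intro b hb' pb hpb
      have ha_keys : a ∈ pos.keys := (pvPos_mem_keys page a).mpr ⟨pa, hpa⟩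
      have hb_keys : b ∈ pos.keys := (pvPos_mem_keys page b).mpr ⟨pb, hpb⟩
      have hga : rm.get? a = some succs :=
        PySem.Dict.get?_of_mem_items rm (by rwa [hitems]) hrmnd
      have hinner := (pvPairInner_iff pos rm a (pos.getD a 0) pos.keys).mp (hb a ha_keys) b hb_keys
      rw [PySem.Dict.getD_of_get?_eq_some pos 0 hpa, PySem.Dict.getD_of_get?_eq_some pos 0 hpb,
        PySem.Dict.getD_eq_get?_getD rm, hga] at hinner
      simp only [Option.getD_some] at hinner
      by_contra hlt
      exact hinner ⟨by omega, by simpa using hb'⟩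
  cases hA' : pvRulesLoop pos rule_map <;> cases hB' : pvPairOuter pos rm pos.keys pos.keys <;>
    simp_all
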